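-- pv_equiv track=rewrite | github.com/Bralabee/fabric_data_quality | dq_framework/alerting/routing.py | _find_highest_failing_severity
-- ===== SOURCE A (Python) =====
-- _SEVERITY_ORDER = ["low", "medium", "high", "critical"]
--
-- def _find_highest_failing_severity(severity_stats: dict) -> str | None:
--     """Find the highest severity level that has failures.
--
--     A severity has failures when ``passed < total`` in its stats.
--
--     Args:
--         severity_stats: Dict mapping severity names to
--             ``{"total": int, "passed": int}`` dicts.
--
--     Returns:
--         The highest failing severity string, or None if none found.
--     """
--     highest: str | None = None
--     highest_rank = -1
--
--     for severity, stats in severity_stats.items():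
--         total = stats.get("total", 0)
--         passed = stats.get("passed", 0)
--         if passed < total:
--             rank = _SEVERITY_ORDER.index(severity) if severity in _SEVERITY_ORDER else -1
--             if rank > highest_rank:
--                 highest = severity
--                 highest_rank = rank
--
--     return highest
-- ===== SOURCE B (Python) =====
-- _SEVERITY_ORDER = ["low", "medium", "high", "critical"]
--
-- def _find_highest_failing_severity(severity_stats: dict) -> str | None:
--     """Scan the fixed severity ranking from highest to lowest and return the
--     first severity that is present and failing (passed < total)."""
--     for sev in reversed(_SEVERITY_ORDER):
--         stats = severity_stats.get(sev)
--         if stats is not None and stats.get("passed", 0) < stats.get("total", 0):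
--             return sev
--     return None
-- ===== Notes on version B (the rewrite author's own statement) =====
-- stated objective: simpler
-- what changed: Instead of scanning the dict while tracking the maximal rank via list.index, B walks the fixed severity order from highest to lowest and returns the first severity that is present and failing, short-circuiting with no index/rank bookkeeping.
import Mathlib
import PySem

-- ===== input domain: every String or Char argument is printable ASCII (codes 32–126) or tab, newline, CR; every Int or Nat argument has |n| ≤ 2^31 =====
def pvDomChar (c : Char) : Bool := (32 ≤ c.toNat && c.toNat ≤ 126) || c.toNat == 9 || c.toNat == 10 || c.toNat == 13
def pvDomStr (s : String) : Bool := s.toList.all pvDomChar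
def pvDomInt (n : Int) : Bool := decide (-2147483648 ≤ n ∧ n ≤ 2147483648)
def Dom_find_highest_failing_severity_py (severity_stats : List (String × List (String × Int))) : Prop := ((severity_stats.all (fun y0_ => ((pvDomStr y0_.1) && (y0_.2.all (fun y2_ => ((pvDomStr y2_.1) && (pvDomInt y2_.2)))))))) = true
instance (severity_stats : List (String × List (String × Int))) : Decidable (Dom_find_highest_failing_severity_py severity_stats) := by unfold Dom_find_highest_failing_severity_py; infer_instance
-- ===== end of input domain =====

-- B replaces A's dict scan with max-rank tracking by a short-circuiting walk of the
-- fixed severity order from highest to lowest (objective: simpler).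


-- ===== PORT A =====
-- _SEVERITY_ORDER
def pvSevOrder : List String := ["low", "medium", "high", "critical"]

-- stats.get(key, 0) on the inner dict (association list, first match)
def pvStatGetD (stats : List (String × Int)) (key : String) : Int :=
  match stats.find? (fun p => p.1 == key) with
  | some p => p.2
  | none => 0

def find_highest_failing_severity_py (severity_stats : List (String × List (String × Int))) : Option String :=
  (severity_stats.foldl
    (fun (acc : Option String × Int) p =>
      let total := pvStatGetD p.2 "total"
      let passed := pvStatGetD p.2 "passed"
      if passed < total then
        let rank : Int :=
          if pvSevOrder.contains p.1 then ((PySem.List.index? pvSevOrder p.1).getD 0 : Nat) else -1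
        if rank > acc.2 then (some p.1, rank) else acc
      else acc)
    (none, -1)).1

-- ===== PORT B =====
def find_highest_failing_severity_py_alt (severity_stats : List (String × List (String × Int))) : Option String :=
  pvSevOrder.reverse.findSome? (fun sev =>
    match severity_stats.find? (fun p => p.1 == sev) with
    | none => none
    | some p => if pvStatGetD p.2 "passed" < pvStatGetD p.2 "total" then some sev else none)

-- ===== PRECONDITION & SPEC =====
-- Pre_ requires the association-list keys to be distinct, as the keys of any Python dict
-- (the argument's actual type) always are; a duplicate-key list represents no dict, and the
-- two ports' behaviour on it (all entries scanned vs first-match lookup) is accidental.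
def Pre_find_highest_failing_severity_py (severity_stats : List (String × List (String × Int))) : Prop :=
  (severity_stats.map Prod.fst).Nodup

instance (severity_stats : List (String × List (String × Int))) : Decidable (Pre_find_highest_failing_severity_py severity_stats) := by
  unfold Pre_find_highest_failing_severity_py; infer_instance

def pvWitness_find_highest_failing_severity_py : (List (String × List (String × Int))) :=
  [("low", [("total", 2), ("passed", 1)]), ("critical", [("total", 3), ("passed", 3)])]

def Spec_find_highest_failing_severity_py (severity_stats : List (String × List (String × Int))) (out : Option String) : Prop := out = find_highest_failing_severity_py_alt severity_stats
instance (severity_stats : List (String × List (String × Int))) (out : Option String) : Decidable (Spec_find_highest_failing_severity_py severity_stats out) := by unfold Spec_find_highest_failing_severity_py; infer_instance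

-- ===== CLAIM (what is proved, stated in full; the proofs are below) =====
def Claim_equal_find_highest_failing_severity_py : Prop := ∀ (severity_stats : List (String × List (String × Int))), Dom_find_highest_failing_severity_py severity_stats → Pre_find_highest_failing_severity_py severity_stats → Spec_find_highest_failing_severity_py severity_stats (find_highest_failing_severity_py severity_stats)

-- ===== LEMMAS AND PROOFS =====

-- proof-side rank of a severity string
def pvRk (s : String) : Int :=
  if s = "low" then 0 else if s = "medium" then 1 else if s = "high" then 2
  else if s = "critical" then 3 else -1

-- the severity stored by A when its rank is r
def pvOptOf (r : Int) : Option String :=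
  if r = 0 then some "low" else if r = 1 then some "medium" else if r = 2 then some "high"
  else if r = 3 then some "critical" else none

def pvFails (st : List (String × Int)) : Bool :=
  pvStatGetD st "passed" < pvStatGetD st "total"

def pvEff (p : String × List (String × Int)) : Int :=
  if pvFails p.2 then pvRk p.1 else -1

def pvM (l : List (String × List (String × Int))) (r : Int) : Int :=
  l.foldl (fun r p => if pvEff p > r then pvEff p else r) r

-- "severity sev is present and failing" via first-match lookup (B's test)
def pvLF (l : List (String × List (String × Int))) (sev : String) : Bool :=
  match l.find? (fun p => p.1 == sev) with
  | some p => pvFails p.2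
  | none => false

set_option maxRecDepth 4096 in
theorem pvRank_eq (s : String) :
    (if pvSevOrder.contains s then (((PySem.List.index? pvSevOrder s).getD 0 : Nat) : Int) else -1) = pvRk s := by
  by_cases h0 : s = "low"
  · subst h0; decide
  by_cases h1 : s = "medium"
  · subst h1; decide
  by_cases h2 : s = "high"
  · subst h2; decide
  by_cases h3 : s = "critical"
  · subst h3; decide
  have hm : s ∉ pvSevOrder := by simp [pvSevOrder, h0, h1, h2, h3]
  simp only [pvRk, h0, h1, h2, h3, if_false]
  simpa using hm

theorem pvOptOf_rk {s : String} (h : 0 ≤ pvRk s) : pvOptOf (pvRk s) = some s := by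
  unfold pvRk at *
  split_ifs at * with a b c d <;> simp_all [pvOptOf]

theorem pvRk_le (s : String) : pvRk s ≤ 3 := by
  unfold pvRk; split_ifs <;> omega

theorem pvEff_le (p : String × List (String × Int)) : pvEff p ≤ 3 := by
  unfold pvEff; split_ifs
  · exact pvRk_le p.1
  · omega

-- A's step function with the rank expression evaluated
def pvStep (acc : Option String × Int) (p : String × List (String × Int)) :
    Option String × Int :=
  if pvFails p.2 then (if pvRk p.1 > acc.2 then (some p.1, pvRk p.1) else acc) else acc

theorem pvStep_eq :
    (fun (acc : Option String × Int) (p : String × List (String × Int)) =>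
      let total := pvStatGetD p.2 "total"
      let passed := pvStatGetD p.2 "passed"
      if passed < total then
        let rank : Int :=
          if pvSevOrder.contains p.1 then ((PySem.List.index? pvSevOrder p.1).getD 0 : Nat) else -1
        if rank > acc.2 then (some p.1, rank) else acc
      else acc) = pvStep := by
  funext acc p
  simp only [pvStep, pvRank_eq, pvFails]
  by_cases hf : pvStatGetD p.2 "passed" < pvStatGetD p.2 "total" <;> simp [hf]

theorem pvM_le_self (t : List (String × List (String × Int))) :
    ∀ r : Int, r ≤ pvM t r := by
  induction t with
  | nil => intro r; simp [pvM]
  | cons u v ihv =>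
    intro r
    simp only [pvM, List.foldl_cons]
    have h1 : r ≤ (if pvEff u > r then pvEff u else r) := by split_ifs <;> omega
    calc r ≤ _ := h1
      _ ≤ _ := ihv _

-- A's fold, characterized by pvM
theorem pvFoldA (l : List (String × List (String × Int))) :
    ∀ r : Int, -1 ≤ r →
    l.foldl pvStep (pvOptOf r, r) = (pvOptOf (pvM l r), pvM l r) := by
  induction l with
  | nil => intro r _; simp [pvM]
  | cons p t ih =>
    intro r hr
    simp only [List.foldl_cons, pvM, pvStep]
    by_cases hf : pvFails p.2
    · rw [if_pos hf]
      have he : pvEff p = pvRk p.1 := by simp [pvEff, hf]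
      by_cases hgt : pvRk p.1 > r
      · have h0 : 0 ≤ pvRk p.1 := by omega
        rw [if_pos hgt]
        have h1 : ((some p.1 : Option String), pvRk p.1) = (pvOptOf (pvRk p.1), pvRk p.1) := by
          rw [pvOptOf_rk h0]
        rw [h1, ih (pvRk p.1) (by omega)]
        have h2 : (if pvEff p > r then pvEff p else r) = pvRk p.1 := by
          rw [he]; rw [if_pos hgt]
        rw [h2]; rfl
      · rw [if_neg hgt, ih r hr]
        have h2 : (if pvEff p > r then pvEff p else r) = r := by
          rw [he]; rw [if_neg hgt]
        rw [h2]; rfl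
    · rw [if_neg hf, ih r hr]
      have he : pvEff p = -1 := by simp [pvEff, hf]
      have h2 : (if pvEff p > r then pvEff p else r) = r := by
        rw [he]; split_ifs <;> omega
      rw [h2]; rfl

theorem pvA_eq (l : List (String × List (String × Int))) :
    find_highest_failing_severity_py l = pvOptOf (pvM l (-1)) := by
  unfold find_highest_failing_severity_py
  rw [pvStep_eq]
  have h0 : (pvOptOf (-1) : Option String) = none := by decide
  rw [← h0, pvFoldA l (-1) (by omega)]

theorem pvM_ub (l : List (String × List (String × Int))) (k : Int) :
    ∀ r : Int, (∀ p ∈ l, pvEff p ≤ k) → r ≤ k → pvM l r ≤ k := by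
  induction l with
  | nil => intro r _ hr; simpa [pvM] using hr
  | cons p t ih =>
    intro r hall hr
    simp only [pvM, List.foldl_cons]
    have hp := hall p (by simp)
    have : (if pvEff p > r then pvEff p else r) ≤ k := by split_ifs <;> omega
    exact ih _ (fun q hq => hall q (by simp [hq])) this

theorem pvM_lb (l : List (String × List (String × Int))) :
    ∀ r : Int, ∀ p ∈ l, pvEff p ≤ pvM l r := by
  induction l with
  | nil => intro r p hp; simp at hp
  | cons q t ih =>
    intro r p hp
    simp only [pvM, List.foldl_cons]
    rcases List.mem_cons.mp hp with h | h
    · subst h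
      have hr : (if pvEff p > r then pvEff p else r) ≥ pvEff p := by split_ifs <;> omega
      calc pvEff p ≤ _ := hr
        _ ≤ _ := pvM_le_self t _
    · exact ih _ p h

-- pvLF true yields a failing entry of that key
theorem pvLF_true {l : List (String × List (String × Int))} {sev : String}
    (h : pvLF l sev = true) : ∃ p ∈ l, p.1 = sev ∧ pvFails p.2 = true := by
  unfold pvLF at h
  cases hf : l.find? (fun p => p.1 == sev) with
  | none => rw [hf] at h; simp at h
  | some p =>
    rw [hf] at h
    refine ⟨p, List.mem_of_find?_eq_some hf, ?_, h⟩
    have := List.find?_some hf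
    simpa using this

-- with nodup keys, pvLF false means every entry of that key passes
theorem pvLF_false {l : List (String × List (String × Int))} {sev : String}
    (hnd : (l.map Prod.fst).Nodup)
    (h : pvLF l sev = false) : ∀ p ∈ l, p.1 = sev → pvFails p.2 = false := by
  intro p hp hkey
  unfold pvLF at h
  cases hf : l.find? (fun q => q.1 == sev) with
  | none =>
    have : l.find? (fun q => q.1 == sev) ≠ none := by
      intro hn
      have := List.find?_eq_none.mp hn p hp
      simp [hkey] at this
    exact absurd hf this
  | some q =>
    rw [hf] at h
    have hq : q ∈ l := List.mem_of_find?_eq_some hf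
    have hqk : q.1 = sev := by simpa using List.find?_some hf
    have : p = q := by
      have h1 : (l.map Prod.fst).Nodup := hnd
      -- two entries of l with equal keys are equal
      by_contra hne
      have : l.Nodup := h1.of_map
      -- use pairwise on the mapped keys
      rcases List.getElem_of_mem hp with ⟨i, hi, rfl⟩
      rcases List.getElem_of_mem hq with ⟨j, hj, rfl⟩
      have hij : i ≠ j := by intro hh; exact hne (by simp [hh])
      have : (l.map Prod.fst)[i]'(by simpa using hi) ≠ (l.map Prod.fst)[j]'(by simpa using hj) :=
        List.Nodup.getElem_inj_iff h1 |>.not.mpr (by simpa using hij)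
      simp only [List.getElem_map] at this
      exact this (hkey.trans hqk.symm)
    rw [this]; exact h

-- pvEff p = k (0 ≤ k) forces p failing with key of rank k
theorem pvEff_pos {p : String × List (String × Int)} {k : Int} (hk : 0 ≤ k)
    (h : pvEff p = k) : pvFails p.2 = true ∧ pvRk p.1 = k := by
  unfold pvEff at h
  split_ifs at h with hf
  · exact ⟨hf, h⟩
  · omega

theorem pvRk_key {s : String} {k : Int} (hk : pvRk s = k) :
    (k = 3 → s = "critical") ∧ (k = 2 → s = "high") ∧ (k = 1 → s = "medium") ∧ (k = 0 → s = "low") := by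
  unfold pvRk at hk
  split_ifs at hk <;> subst_vars <;> refine ⟨?_, ?_, ?_, ?_⟩ <;> intro h <;> first | rfl | omega

-- B unfolded into the four ordered tests
theorem pvB_eq (l : List (String × List (String × Int))) :
    find_highest_failing_severity_py_alt l =
      (if pvLF l "critical" then some "critical" else
       if pvLF l "high" then some "high" else
       if pvLF l "medium" then some "medium" else
       if pvLF l "low" then some "low" else none) := by
  unfold find_highest_failing_severity_py_alt pvSevOrder
  have step : ∀ sev, (match l.find? (fun p => p.1 == sev) with
      | none => (none : Option String)
      | some p => if pvStatGetD p.2 "passed" < pvStatGetD p.2 "total" then some sev else none)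
      = if pvLF l sev then some sev else none := by
    intro sev
    unfold pvLF
    cases l.find? (fun p => p.1 == sev) with
    | none => simp
    | some p => simp [pvFails]
  simp only [List.reverse, List.reverseAux, List.findSome?]
  rw [step, step, step, step]
  split_ifs <;> rfl

-- if a severity of rank k is "looked-up failing", pvM l (-1) ≥ k
theorem pvM_ge_of_LF {l : List (String × List (String × Int))} {sev : String}
    (h : pvLF l sev = true) : pvRk sev ≤ pvM l (-1) := by
  rcases pvLF_true h with ⟨p, hp, hkey, hf⟩
  have : pvEff p = pvRk sev := by simp [pvEff, hf, hkey]
  have := pvM_lb l (-1) p hp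
  omega

-- with nodup keys, if sev (one of the four) is not looked-up failing, no entry has eff = rk sev
theorem pvM_bound {l : List (String × List (String × Int))} (hnd : (l.map Prod.fst).Nodup)
    (k : Int) (hk : -1 ≤ k) (hk3 : k ≤ 3)
    (hall : ∀ sev, k < pvRk sev → pvRk sev ≤ 3 → pvLF l sev = false) :
    pvM l (-1) ≤ k := by
  apply pvM_ub l k (-1) _ (by omega)
  intro p hp
  by_contra hgt
  have h0 : 0 ≤ pvEff p := by omega
  rcases pvEff_pos h0 rfl with ⟨hf, _⟩
  have hrk : pvRk p.1 = pvEff p := by simp [pvEff, hf]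
  have hlf : pvLF l p.1 = false := hall p.1 (by omega) (by rw [hrk]; exact pvEff_le p)
  have := pvLF_false hnd hlf p hp rfl
  rw [this] at hf; exact absurd hf (by simp)

theorem pvMain (l : List (String × List (String × Int))) (hnd : (l.map Prod.fst).Nodup) :
    find_highest_failing_severity_py l = find_highest_failing_severity_py_alt l := by
  rw [pvA_eq, pvB_eq]
  have hrkc : pvRk "critical" = 3 := by decide
  have hrkh : pvRk "high" = 2 := by decide
  have hrkm : pvRk "medium" = 1 := by decide
  have hrkl : pvRk "low" = 0 := by decide
  by_cases h3 : pvLF l "critical"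
  · have hge := pvM_ge_of_LF h3
    have hle : pvM l (-1) ≤ 3 := pvM_ub l 3 (-1) (fun p _ => pvEff_le p) (by omega)
    have : pvM l (-1) = 3 := by omega
    simp [h3, this, pvOptOf]
  by_cases h2 : pvLF l "high"
  · have hge := pvM_ge_of_LF h2
    have hle : pvM l (-1) ≤ 2 := by
      apply pvM_bound hnd 2 (by omega) (by omega)
      intro sev hlt hle3
      have : sev = "critical" := (pvRk_key (k := pvRk sev) rfl).1 (by omega)
      rw [this]; simpa using h3
    have : pvM l (-1) = 2 := by omega
    simp [h3, h2, this, pvOptOf]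
  by_cases h1 : pvLF l "medium"
  · have hge := pvM_ge_of_LF h1
    have hle : pvM l (-1) ≤ 1 := by
      apply pvM_bound hnd 1 (by omega) (by omega)
      intro sev hlt hle3
      rcases pvRk_key (k := pvRk sev) rfl with ⟨hc, hh, _, _⟩
      have hor : pvRk sev = 2 ∨ pvRk sev = 3 := by omega
      rcases hor with h | h
      · rw [hh h]; simpa using h2
      · rw [hc h]; simpa using h3
    have : pvM l (-1) = 1 := by omega
    simp [h3, h2, h1, this, pvOptOf]
  by_cases h0 : pvLF l "low"
  · have hge := pvM_ge_of_LF h0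
    have hle : pvM l (-1) ≤ 0 := by
      apply pvM_bound hnd 0 (by omega) (by omega)
      intro sev hlt hle3
      rcases pvRk_key (k := pvRk sev) rfl with ⟨hc, hh, hm, _⟩
      have hor : pvRk sev = 1 ∨ pvRk sev = 2 ∨ pvRk sev = 3 := by omega
      rcases hor with h | h | h
      · rw [hm h]; simpa using h1
      · rw [hh h]; simpa using h2
      · rw [hc h]; simpa using h3
    have : pvM l (-1) = 0 := by omega
    simp [h3, h2, h1, h0, this, pvOptOf]
  · have hle : pvM l (-1) ≤ -1 := by
      apply pvM_bound hnd (-1) (by omega) (by omega)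
      intro sev hlt hle3
      rcases pvRk_key (k := pvRk sev) rfl with ⟨hc, hh, hm, hl⟩
      have hor : pvRk sev = 0 ∨ pvRk sev = 1 ∨ pvRk sev = 2 ∨ pvRk sev = 3 := by omega
      rcases hor with h | h | h | h
      · rw [hl h]; simpa using h0
      · rw [hm h]; simpa using h1
      · rw [hh h]; simpa using h2
      · rw [hc h]; simpa using h3
    have hge : -1 ≤ pvM l (-1) := pvM_le_self l (-1)
    have : pvM l (-1) = -1 := by omega
    simp [h3, h2, h1, h0, this, pvOptOf]

-- ===== VERDICT (by name: the statement is the Claim_ definition above) =====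
theorem find_highest_failing_severity_py_spec : Claim_equal_find_highest_failing_severity_py := by
  intro l _ hpre
  unfold Spec_find_highest_failing_severity_py
  exact pvMain l hpre
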